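-- pv_equiv track=rewrite | github.com/Arshidtm/DSA | section1/Data Structure/string.py | titl
-- ===== SOURCE A (Python) =====
-- def titl(s):
--     new_str = ''
--     capitalize_next = True
--
--     for char in s:
--         if char == ' ':
--             new_str += char
--             capitalize_next = True  # Set flag to capitalize next character
--         else:
--             if capitalize_next and 'a' <= char <= 'z':
--                 new_str += chr(ord(char) - 32)  # Capitalize the character
--             elif not capitalize_next and "A" <= char <= 'Z':
--                 new_str += chr(ord(char) + 32)  # Lowercase the character
--             else:
--                 new_str += char
--             capitalize_next = False  # Reset flag after processing a character
--
--     return new_str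
-- ===== SOURCE B (Python) =====
-- def titl(s):
--     words = []
--     for w in s.split(' '):
--         if w:
--             head = chr(ord(w[0]) - 32) if 'a' <= w[0] <= 'z' else w[0]
--             tail = ''.join(chr(ord(c) + 32) if 'A' <= c <= 'Z' else c for c in w[1:])
--             words.append(head + tail)
--         else:
--             words.append(w)
--     return ' '.join(words)
-- ===== Notes on version B (the rewrite author's own statement) =====
-- stated objective: simpler
-- what changed: Replaces the flag-driven per-character loop with a split-on-space / per-word-map / join decomposition: each word's first character is uppercased if it is a lowercase ASCII letter and the remaining characters are lowercased if uppercase ASCII letters, with the same ord-arithmetic case shift as A.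
import Mathlib
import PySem

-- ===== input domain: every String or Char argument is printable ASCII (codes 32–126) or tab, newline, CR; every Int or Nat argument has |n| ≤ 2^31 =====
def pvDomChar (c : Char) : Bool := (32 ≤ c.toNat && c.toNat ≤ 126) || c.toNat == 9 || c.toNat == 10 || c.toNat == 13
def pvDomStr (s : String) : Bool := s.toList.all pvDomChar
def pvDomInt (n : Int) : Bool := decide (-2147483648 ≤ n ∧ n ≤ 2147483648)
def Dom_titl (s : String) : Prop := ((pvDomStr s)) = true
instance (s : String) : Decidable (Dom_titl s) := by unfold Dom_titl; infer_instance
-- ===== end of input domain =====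

-- B replaces A's flag-driven single-character loop by a split-on-space / per-word-map / join decomposition (objective: simpler).

-- ===== PORT A =====
-- chr(ord(c) - 32) for 'a' ≤ c ≤ 'z'
def pvUpChar (c : Char) : Char := Char.ofNat (c.toNat - 32)
-- chr(ord(c) + 32) for 'A' ≤ c ≤ 'Z'
def pvDownChar (c : Char) : Char := Char.ofNat (c.toNat + 32)

-- the for-loop over the characters, carrying the capitalize_next flag; output built forward
def titlGo (cap : Bool) : List Char → List Char
  | [] => []
  | c :: rest =>
    if c = ' ' then c :: titlGo true rest
    else (if cap = true ∧ 'a' ≤ c ∧ c ≤ 'z' then pvUpChar c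
          else if cap = false ∧ 'A' ≤ c ∧ c ≤ 'Z' then pvDownChar c
          else c) :: titlGo false rest

def titl (s : String) : String := String.mk (titlGo true s.toList)

-- ===== PORT B =====
-- lowercase the tail characters of a word
def pvTailFix (w : List Char) : List Char :=
  w.map (fun c => if 'A' ≤ c ∧ c ≤ 'Z' then pvDownChar c else c)

-- process one word: uppercase first char if 'a'..'z', lowercase the rest where 'A'..'Z'
def pvWordFix (w : List Char) : List Char :=
  match w with
  | [] => []
  | c :: rest => (if 'a' ≤ c ∧ c ≤ 'z' then pvUpChar c else c) :: pvTailFix rest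

def titl_alt (s : String) : String :=
  String.mk (PySem.Chars.join [' '] ((s.toList.splitOn ' ').map pvWordFix))

-- ===== PRECONDITION & SPEC =====
def Spec_titl (s : String) (out : String) : Prop := out = titl_alt s
instance (s : String) (out : String) : Decidable (Spec_titl s out) := by unfold Spec_titl; infer_instance

-- ===== CLAIM (what is proved, stated in full; the proofs are below) =====
def Claim_equal_titl : Prop := ∀ (s : String), Dom_titl s → Spec_titl s (titl s)

-- ===== LEMMAS AND PROOFS =====

theorem intercalate_cons_head (sep : List Char) (x : Char) (w : List Char)
    (ws : List (List Char)) :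
    sep.intercalate ((x :: w) :: ws) = x :: sep.intercalate (w :: ws) := by
  cases ws <;> simp [List.intercalate, List.intersperse]

theorem splitOn_char_cons (c : Char) (l : List Char) :
    (c :: l).splitOn ' ' =
      if c = ' ' then [] :: l.splitOn ' '
      else List.modifyHead (List.cons c) (l.splitOn ' ') := by
  simp [List.splitOn, List.splitOnP_cons]

-- B's whole pipeline on the char list
def pvB (l : List Char) : List Char :=
  PySem.Chars.join [' '] ((l.splitOn ' ').map pvWordFix)

-- B's pipeline when the loop is in the "inside a word, flag down" state:
-- the first word's chars all get the tail treatment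
def pvBmid (l : List Char) : List Char :=
  match l.splitOn ' ' with
  | [] => []
  | w :: ws => PySem.Chars.join [' '] (pvTailFix w :: ws.map pvWordFix)

theorem titlGo_eq (l : List Char) :
    titlGo true l = pvB l ∧ titlGo false l = pvBmid l := by
  induction l with
  | nil => constructor <;> simp [titlGo, pvB, pvBmid, pvWordFix,
      pvTailFix, PySem.Chars.join, List.intercalate]
  | cons c rest ih =>
    obtain ⟨iht, ihf⟩ := ih
    obtain ⟨w, ws, hsplit⟩ : ∃ w ws, rest.splitOn ' ' = w :: ws := by
      rcases h : rest.splitOn ' ' with _ | ⟨w, ws⟩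
      · exact absurd h (List.splitOnP_ne_nil _ _)
      · exact ⟨w, ws, rfl⟩
    by_cases hc : c = ' '
    · subst hc
      constructor <;>
        simp_all [titlGo, pvB, pvBmid, splitOn_char_cons, pvWordFix, pvTailFix,
          PySem.Chars.join, List.intercalate]
    · constructor <;>
        simp_all [titlGo, pvB, pvBmid, splitOn_char_cons, pvWordFix, pvTailFix,
          PySem.Chars.join, intercalate_cons_head]

-- ===== VERDICT (by name: the statement is the Claim_ definition above) =====
theorem titl_spec : Claim_equal_titl := by
  intro s _
  unfold Spec_titl titl titl_alt
  rw [(titlGo_eq s.toList).1]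
  rfl
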